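-- pv_equiv track=rewrite | github.com/Dv1de29/CFG-Parser-Verify | check_string.py | derive_string
-- ===== SOURCE A (Python) =====
-- def derive_string(productions, target_string, start_symbol = "S"):
--     def do_steps(current_string, deriv_steps, max_depth=50):
--         if len(deriv_steps) > max_depth:
--             return None
--
--         if current_string == target_string:
--             return deriv_steps
--
--         if all(c not in productions for c in current_string):
--             return None
--
--         for i, symbol in enumerate(current_string):
--             if symbol in productions:
--                 for prod in productions[symbol]:
--                     aux = prod if prod != "@" else ""
--                     string_aux = current_string[:i] + aux + current_string[i+1:]
--                     result = do_steps(string_aux, deriv_steps + [string_aux])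
--                     if result:
--                         return result
--                 break
--
--         return None
--
--     return do_steps(start_symbol, [start_symbol])
-- ===== SOURCE B (Python) =====
-- def derive_string(productions, target_string, start_symbol="S"):
--     stack = [(start_symbol, [start_symbol])]
--     while stack:
--         current_string, deriv_steps = stack.pop()
--         if len(deriv_steps) > 50:
--             continue
--         if current_string == target_string:
--             return deriv_steps
--         i = next((j for j, c in enumerate(current_string) if c in productions), None)
--         if i is None:
--             continue
--         for prod in reversed(productions[current_string[i]]):
--             aux = "" if prod == "@" else prod
--             child = current_string[:i] + aux + current_string[i + 1:]
--             stack.append((child, deriv_steps + [child]))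
--     return None
-- ===== Notes on version B (the rewrite author's own statement) =====
-- stated objective: alternative
-- what changed: Replaces A's recursive DFS (with its redundant all-characters dead-end pre-scan and per-production recursive calls) by an explicit stack of (string, steps) frames popped in a loop, children pushed in reverse production order, with a single leftmost-nonterminal scan per frame.
import Mathlib
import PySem

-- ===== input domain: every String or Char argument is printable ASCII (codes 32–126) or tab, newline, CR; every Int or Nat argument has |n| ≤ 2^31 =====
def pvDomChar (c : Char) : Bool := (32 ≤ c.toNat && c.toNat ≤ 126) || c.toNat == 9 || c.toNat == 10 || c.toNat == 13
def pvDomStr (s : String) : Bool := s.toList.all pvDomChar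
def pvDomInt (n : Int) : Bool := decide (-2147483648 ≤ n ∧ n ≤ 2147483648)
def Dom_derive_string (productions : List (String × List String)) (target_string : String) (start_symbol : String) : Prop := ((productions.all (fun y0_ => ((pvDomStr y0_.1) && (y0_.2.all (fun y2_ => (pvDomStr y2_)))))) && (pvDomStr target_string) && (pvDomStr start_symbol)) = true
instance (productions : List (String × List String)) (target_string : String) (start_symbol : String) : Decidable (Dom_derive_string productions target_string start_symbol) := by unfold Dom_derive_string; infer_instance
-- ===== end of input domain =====

-- B replaces A's recursive DFS by an explicit stack loop (frames pushed in reverse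
-- production order, single leftmost-nonterminal scan); same results, alternative decomposition.

-- ===== PORT A =====
-- shared helper: the substitution current_string[:i] + aux + current_string[i+1:] ('@' means empty)
def pvChild (cur : List Char) (i : Nat) (prod : String) : List Char :=
  cur.take i ++ (if prod = "@" then [] else prod.toList) ++ cur.drop (i + 1)

-- A's enumerate scan: first (index, symbol) of cur with symbol a key of the dict
def pvFindNT (d : PySem.Dict String (List String)) : List Char → Nat → Option (Nat × Char)
  | [], _ => none
  | c :: cs, i => if d.contains (String.ofList [c]) then some (i, c) else pvFindNT d cs (i + 1)

-- A's inner 'for prod in productions[symbol]' loop with its 'if result: return result'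
-- (Python truthiness: a returned empty list would not be accepted)
def pvTryProds (step : List Char → List String → Option (List String))
    (cur : List Char) (i : Nat) (steps : List String) : List String → Option (List String)
  | [] => none
  | prod :: rest =>
    let child := pvChild cur i prod
    match step child (steps ++ [String.ofList child]) with
    | some r => if r = [] then pvTryProds step cur i steps rest else some r
    | none => pvTryProds step cur i steps rest

-- A's do_steps; fuel only for termination (the depth check fires first: length grows by 1
-- per call and 'len > 50' cuts at 51, so fuel 52 from the initial length-1 list never runs out)
def pvDoSteps (d : PySem.Dict String (List String)) (target : List Char) :
    Nat → List Char → List String → Option (List String)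
  | 0, _, _ => none
  | fuel + 1, cur, steps =>
    if steps.length > 50 then none
    else if cur = target then some steps
    else if cur.all (fun c => !d.contains (String.ofList [c])) then none
    else
      match pvFindNT d cur 0 with
      | none => none
      | some (i, c) => pvTryProds (pvDoSteps d target fuel) cur i steps (d.getD (String.ofList [c]) [])

def derive_string (productions : List (String × List String)) (target_string : String) (start_symbol : String) : Option (List String) :=
  pvDoSteps (PySem.Dict.ofList productions) target_string.toList 52 start_symbol.toList [start_symbol]

-- ===== PORT B =====
-- termination bookkeeping for the stack loop: each frame of depth-budget d is worth (K+1)^d,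
-- where K bounds how many children one expansion pushes
def pvK (d : PySem.Dict String (List String)) : Nat :=
  (d.values.map List.length).foldr max 0

def pvPot (K : Nat) (steps : List String) : Nat := (K + 1) ^ (51 - steps.length)

def pvMeasure (K : Nat) (fs : List (List Char × List String)) : Nat :=
  (fs.map (fun f => pvPot K f.2)).sum

theorem pvPot_pos (K : Nat) (steps : List String) : 0 < pvPot K steps :=
  Nat.pow_pos (Nat.succ_pos K)

theorem pvLe_foldr_max (n : Nat) : ∀ l : List Nat, n ∈ l → n ≤ l.foldr max 0
  | [], h => by simp at h
  | a :: l, h => by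
    rcases List.mem_cons.mp h with rfl | h
    · exact le_max_left _ _  
    · exact le_trans (pvLe_foldr_max n l h) (le_max_right _ _)

theorem pvGetD_length_le (d : PySem.Dict String (List String)) (k : String) :
    (d.getD k []).length ≤ pvK d := by
  rw [PySem.Dict.getD_eq_get?_getD]
  cases hg : d.get? k with
  | none => simp
  | some v =>
    have hv : v ∈ d.values := by
      have := PySem.Dict.mem_items_of_get?_eq_some d hg
      simp only [PySem.Dict.values]
      exact List.mem_map_of_mem this
    exact pvLe_foldr_max _ _ (List.mem_map_of_mem hv)

theorem pvMeasure_cons (K : Nat) (f : List Char × List String) (fs : List (List Char × List String)) :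
    pvMeasure K (f :: fs) = pvPot K f.2 + pvMeasure K fs := by
  simp [pvMeasure]

theorem pvMeasure_append (K : Nat) (fs gs : List (List Char × List String)) :
    pvMeasure K (fs ++ gs) = pvMeasure K fs + pvMeasure K gs := by
  simp [pvMeasure]

-- the expansion step strictly shrinks the measure
theorem pvMeasure_expand (K : Nat) (children rest : List (List Char × List String))
    (steps : List String) (hn : children.length ≤ K)
    (hl : ∀ f ∈ children, f.2.length = steps.length + 1) (h50 : steps.length ≤ 50) :
    pvMeasure K (children ++ rest) < pvPot K steps + pvMeasure K rest := by
  rw [pvMeasure_append]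
  have hch : pvMeasure K children ≤ K * (K + 1) ^ (50 - steps.length) := by
    have h51 : ∀ f ∈ children, pvPot K f.2 = (K + 1) ^ (50 - steps.length) := by
      intro f hf
      have he : 51 - (f.2 : List String).length = 50 - steps.length := by
        have := hl f hf; omega
      simp [pvPot, he]
    calc pvMeasure K children
        ≤ (children.map (fun f => pvPot K f.2)).length • ((K + 1) ^ (50 - steps.length)) := by
          refine List.sum_le_card_nsmul _ _ ?_
          intro x hx
          rcases List.mem_map.mp hx with ⟨f, hf, rfl⟩
          exact le_of_eq (h51 f hf)
      _ = children.length * (K + 1) ^ (50 - steps.length) := by simp [smul_eq_mul]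
      _ ≤ K * (K + 1) ^ (50 - steps.length) := Nat.mul_le_mul_right _ hn
  have hpot : pvPot K steps = (K + 1) * (K + 1) ^ (50 - steps.length) := by
    unfold pvPot
    have : 51 - steps.length = (50 - steps.length) + 1 := by omega
    rw [this, pow_succ, mul_comm]
  have hpos : 0 < (K + 1) ^ (50 - steps.length) := Nat.pow_pos (Nat.succ_pos K)
  have : K * (K + 1) ^ (50 - steps.length) < (K + 1) * (K + 1) ^ (50 - steps.length) :=
    Nat.mul_lt_mul_of_lt_of_le (Nat.lt_succ_self K) (le_refl _) hpos
  omega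

-- B's child frames of one expansion (in production order; popping the head of the
-- frame list is popping a stack onto which they were pushed in reverse order)
def pvFrames (d : PySem.Dict String (List String)) (cur : List Char) (i : Nat) (c : Char)
    (steps : List String) : List (List Char × List String) :=
  (d.getD (String.ofList [c]) []).map
    (fun prod => (pvChild cur i prod, steps ++ [String.ofList (pvChild cur i prod)]))

theorem pvFrames_length (d cur i c steps) :
    (pvFrames d cur i c steps).length ≤ pvK d := by
  simpa [pvFrames] using pvGetD_length_le d (String.ofList [c])

theorem pvFrames_steps (d cur i c steps) :
    ∀ f ∈ pvFrames d cur i c steps, (f : List Char × List String).2.length = steps.length + 1 := by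
  intro f hf
  rcases List.mem_map.mp hf with ⟨prod, _, rfl⟩
  simp

-- B's stack loop
def pvLoop (d : PySem.Dict String (List String)) (target : List Char) :
    List (List Char × List String) → Option (List String)
  | [] => none
  | (cur, steps) :: rest =>
    if _h50 : steps.length > 50 then pvLoop d target rest
    else if cur = target then some steps
    else
      match pvFindNT d cur 0 with
      | none => pvLoop d target rest
      | some (i, c) => pvLoop d target (pvFrames d cur i c steps ++ rest)
termination_by fs => pvMeasure (pvK d) fs
decreasing_by
  · simp only [pvMeasure_cons]; have := pvPot_pos (pvK d) steps; omega
  · simp only [pvMeasure_cons]; have := pvPot_pos (pvK d) steps; omega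
  · simp only [pvMeasure_cons]
    exact pvMeasure_expand _ _ _ _ (pvFrames_length d cur i c steps)
      (pvFrames_steps d cur i c steps) (by omega)

def derive_string_alt (productions : List (String × List String)) (target_string : String) (start_symbol : String) : Option (List String) :=
  pvLoop (PySem.Dict.ofList productions) target_string.toList [(start_symbol.toList, [start_symbol])]

-- ===== PRECONDITION & SPEC =====
def Spec_derive_string (productions : List (String × List String)) (target_string : String) (start_symbol : String) (out : Option (List String)) : Prop := out = derive_string_alt productions target_string start_symbol
instance (productions : List (String × List String)) (target_string : String) (start_symbol : String) (out : Option (List String)) : Decidable (Spec_derive_string productions target_string start_symbol out) := by unfold Spec_derive_string; infer_instance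

-- ===== CLAIM (what is proved, stated in full; the proofs are below) =====
def Claim_equal_derive_string : Prop := ∀ (productions : List (String × List String)) (target_string : String) (start_symbol : String), Dom_derive_string productions target_string start_symbol → Spec_derive_string productions target_string start_symbol (derive_string productions target_string start_symbol)

-- ===== LEMMAS AND PROOFS =====

theorem pvLoop_nil (d : PySem.Dict String (List String)) (t : List Char) :
    pvLoop d t [] = none := by rw [pvLoop]

theorem pvLoop_cons (d : PySem.Dict String (List String)) (t : List Char)
    (cur : List Char) (steps : List String) (rest : List (List Char × List String)) :
    pvLoop d t ((cur, steps) :: rest) =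
      if steps.length > 50 then pvLoop d t rest
      else if cur = t then some steps
      else
        match pvFindNT d cur 0 with
        | none => pvLoop d t rest
        | some (i, c) => pvLoop d t (pvFrames d cur i c steps ++ rest) := by
  rw [pvLoop]
  simp only [dite_eq_ite]

-- A's success values are never the empty list (the 'if result:' truthiness check)
theorem pvTryProds_ne_nil (step : List Char → List String → Option (List String))
    (cur : List Char) (i : Nat) (steps : List String) :
    ∀ prods r, pvTryProds step cur i steps prods = some r → r ≠ []
  | [], r => by intro h; simp [pvTryProds] at h
  | prod :: rest, r => by
    intro h
    simp only [pvTryProds] at h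
    cases hs : step (pvChild cur i prod) (steps ++ [String.ofList (pvChild cur i prod)]) with
    | none =>
      rw [hs] at h
      exact pvTryProds_ne_nil step cur i steps rest r h
    | some v =>
      rw [hs] at h
      dsimp only at h
      by_cases hv : v = []
      · rw [if_pos hv] at h
        exact pvTryProds_ne_nil step cur i steps rest r h
      · rw [if_neg hv] at h
        cases Option.some.inj h
        exact hv

theorem pvDoSteps_ne_nil (d : PySem.Dict String (List String)) (t : List Char)
    (fuel : Nat) (cur : List Char) (steps : List String) (r : List String)
    (hs : steps ≠ []) (h : pvDoSteps d t fuel cur steps = some r) : r ≠ [] := by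
  cases fuel with
  | zero => simp [pvDoSteps] at h
  | succ fuel =>
    simp only [pvDoSteps] at h
    by_cases h1 : steps.length > 50
    · rw [if_pos h1] at h; simp at h
    · rw [if_neg h1] at h
      by_cases h2 : cur = t
      · rw [if_pos h2] at h
        exact Option.some.inj h ▸ hs
      · rw [if_neg h2] at h
        by_cases h3 : (cur.all fun c => !d.contains (String.ofList [c])) = true
        · rw [if_pos h3] at h; simp at h
        · rw [if_neg h3] at h
          cases hf : pvFindNT d cur 0 with
          | none => rw [hf] at h; simp at h
          | some p =>
            obtain ⟨i, c⟩ := p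
            rw [hf] at h
            dsimp only at h
            exact pvTryProds_ne_nil _ _ _ _ _ _ h

-- leftmost-scan failure is exactly A's all-not-a-key test
theorem pvFindNT_none_iff (d : PySem.Dict String (List String)) :
    ∀ (cur : List Char) (i : Nat),
      pvFindNT d cur i = none ↔ cur.all (fun c => !d.contains (String.ofList [c])) = true
  | [], i => by simp [pvFindNT]
  | c :: cs, i => by
    simp only [pvFindNT, List.all_cons, Bool.and_eq_true, Bool.not_eq_true']
    by_cases hc : d.contains (String.ofList [c]) = true
    · simp [hc]
    · simp only [Bool.not_eq_true] at hc
      simp [hc, pvFindNT_none_iff d cs (i + 1)]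

-- the stack loop searches the top frames completely before touching what lies below
theorem pvLoop_append (d : PySem.Dict String (List String)) (t : List Char) :
    ∀ (n : Nat) (fs rest : List (List Char × List String)), pvMeasure (pvK d) fs < n →
      pvLoop d t (fs ++ rest) = (pvLoop d t fs).or (pvLoop d t rest)
  | n + 1, [], rest, _ => by simp [pvLoop_nil]
  | n + 1, (cur, steps) :: fs, rest, hm => by
    rw [pvMeasure_cons] at hm
    dsimp only at hm
    have hpot := pvPot_pos (pvK d) steps
    rw [List.cons_append, pvLoop_cons, pvLoop_cons]
    by_cases h50 : steps.length > 50
    · rw [if_pos h50, if_pos h50]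
      exact pvLoop_append d t n fs rest (by omega)
    · rw [if_neg h50, if_neg h50]
      by_cases ht : cur = t
      · simp [ht]
      · rw [if_neg ht, if_neg ht]
        cases hf : pvFindNT d cur 0 with
        | none => exact pvLoop_append d t n fs rest (by omega)
        | some p =>
          obtain ⟨i, c⟩ := p
          dsimp only
          rw [← List.append_assoc]
          have hlt : pvMeasure (pvK d) (pvFrames d cur i c steps ++ fs) < n := by
            have hexp := pvMeasure_expand (pvK d) (pvFrames d cur i c steps) fs
              steps (pvFrames_length d cur i c steps) (pvFrames_steps d cur i c steps)
              (by omega)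
            omega
          exact pvLoop_append d t n (pvFrames d cur i c steps ++ fs) rest hlt

-- main bridge: the recursion equals the one-frame stack loop (fuel never runs out:
-- 53 ≤ steps.length + fuel is preserved and forces the depth cut before fuel 0)
theorem pvBridge (d : PySem.Dict String (List String)) (t : List Char) :
    ∀ (fuel : Nat) (cur : List Char) (steps : List String), steps ≠ [] →
      53 ≤ steps.length + fuel →
      pvDoSteps d t fuel cur steps = pvLoop d t [(cur, steps)] := by
  intro fuel
  induction fuel with
  | zero =>
    intro cur steps _ hlen
    rw [pvLoop_cons, if_pos (by omega), pvLoop_nil]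
    simp [pvDoSteps]
  | succ fuel IH =>
    intro cur steps hs hlen
    rw [pvLoop_cons]
    simp only [pvDoSteps]
    by_cases h50 : steps.length > 50
    · rw [if_pos h50, if_pos h50, pvLoop_nil]
    · rw [if_neg h50, if_neg h50]
      by_cases ht : cur = t
      · rw [if_pos ht, if_pos ht]
      · rw [if_neg ht, if_neg ht]
        by_cases hall : cur.all (fun c => !d.contains (String.ofList [c])) = true
        · rw [if_pos hall]
          rw [(pvFindNT_none_iff d cur 0).mpr hall, pvLoop_nil]
        · rw [if_neg hall]
          cases hf : pvFindNT d cur 0 with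
          | none => exact absurd ((pvFindNT_none_iff d cur 0).mp hf) hall
          | some p =>
            obtain ⟨i, c⟩ := p
            dsimp only
            rw [List.append_nil]
            -- inner production loop = stack loop on the child frames
            have hC : ∀ prods : List String,
                pvTryProds (pvDoSteps d t fuel) cur i steps prods
                  = pvLoop d t (prods.map
                      (fun prod => (pvChild cur i prod, steps ++ [String.ofList (pvChild cur i prod)]))) := by
              intro prods
              induction prods with
              | nil => simp [pvTryProds, pvLoop_nil]
              | cons prod rest IHp =>
                simp only [pvTryProds, List.map_cons]
                rw [show ((pvChild cur i prod, steps ++ [String.ofList (pvChild cur i prod)]) ::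
                      rest.map (fun prod => (pvChild cur i prod, steps ++ [String.ofList (pvChild cur i prod)])))
                    = [(pvChild cur i prod, steps ++ [String.ofList (pvChild cur i prod)])] ++
                      rest.map (fun prod => (pvChild cur i prod, steps ++ [String.ofList (pvChild cur i prod)]))
                    from rfl]
                rw [pvLoop_append d t (pvMeasure (pvK d) _ + 1) _ _ (Nat.lt_succ_self _)]
                have hrec := IH (pvChild cur i prod) (steps ++ [String.ofList (pvChild cur i prod)])
                  (by simp) (by simp; omega)
                cases hres : pvDoSteps d t fuel (pvChild cur i prod)
                    (steps ++ [String.ofList (pvChild cur i prod)]) with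
                | none =>
                  rw [hres] at hrec
                  dsimp only
                  rw [← hrec, Option.none_or, IHp]
                | some r =>
                  rw [hres] at hrec
                  dsimp only
                  have hr : r ≠ [] := pvDoSteps_ne_nil d t fuel _ _ r (by simp) hres
                  rw [← hrec, Option.some_or, if_neg hr]
            exact hC (d.getD (String.ofList [c]) [])

-- ===== VERDICT (by name: the statement is the Claim_ definition above) =====
theorem derive_string_spec : Claim_equal_derive_string := by
  intro productions target_string start_symbol _
  unfold Spec_derive_string derive_string derive_string_alt
  exact pvBridge _ _ 52 _ _ (by simp) (by simp)
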